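-- pv_equiv track=rewrite | github.com/ITRoselloSignoris/University_CodingActivities | Python/Repaso/solucion.py | contador_posibles_correctas
-- ===== SOURCE A (Python) =====
-- def contador_posibles_correctas(lista)->int:
--     contador=0
--     verdaderos=0
--     for x in lista:
--         verdaderos += int(x)
--     if verdaderos == (len(lista)/2):
--         contador= len(lista)
--     elif verdaderos < (len(lista)/2):
--         contador = int(len(lista)/2) + verdaderos
--     else:
--         falsos = len(lista) - verdaderos
--         contador = int(len(lista)/2) + falsos
--     return contador
-- ===== SOURCE B (Python) =====
-- def contador_posibles_correctas(lista) -> int: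
--     vals = [int(x) for x in lista]
--     pares = 0
--     while 1 in vals and 0 in vals:
--         vals.remove(1)
--         vals.remove(0)
--         pares += 2
--     return pares + len(vals) // 2
-- ===== Notes on version B (the rewrite author's own statement) =====
-- stated objective: alternative
-- what changed: Instead of summing the converted values and branching three ways, B repeatedly matches one 1 with one 0 (removing the first occurrence of each per iteration, adding 2 per matched pair) until the remaining values are homogeneous, then adds len//2 of the remainder.
import Mathlib
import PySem

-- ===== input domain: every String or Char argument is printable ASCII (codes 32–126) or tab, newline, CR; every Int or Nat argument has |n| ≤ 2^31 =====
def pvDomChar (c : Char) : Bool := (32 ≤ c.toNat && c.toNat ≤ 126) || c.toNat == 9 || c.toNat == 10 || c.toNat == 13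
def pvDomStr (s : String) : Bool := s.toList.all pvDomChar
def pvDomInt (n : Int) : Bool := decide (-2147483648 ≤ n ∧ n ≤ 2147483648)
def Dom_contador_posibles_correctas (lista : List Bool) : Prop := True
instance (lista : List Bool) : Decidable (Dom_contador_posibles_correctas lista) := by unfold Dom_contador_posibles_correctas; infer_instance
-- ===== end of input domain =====

-- B replaces A's sum-then-branch by recursive 1/0 pair matching (alternative decomposition; return-value equivalence).


-- ===== PORT A =====
-- 'verdaderos == len/2' and 'verdaderos < len/2' compare an int with the float len/2;
-- on these integer values this is exactly 2*verdaderos = n / 2*verdaderos < n.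
-- int(len(lista)/2) for n ≥ 0 equals floor division, ported as PySem.Int.floordiv n 2.
def contador_posibles_correctas (lista : List Bool) : Int :=
  let verdaderos := lista.foldl (fun acc x => acc + (if x then (1:Int) else 0)) 0
  let n : Int := lista.length
  if 2 * verdaderos = n then n
  else if 2 * verdaderos < n then PySem.Int.floordiv n 2 + verdaderos
  else PySem.Int.floordiv n 2 + (n - verdaderos)

-- ===== PORT B =====
-- the while loop: while both a 1 and a 0 are present, remove the first occurrence of
-- each (list.remove = List.erase, first match) and add 2 to pares; then pares + len//2.
def pvGo (vals : List Int) (pares : Int) : Int :=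
  if 1 ∈ vals ∧ 0 ∈ vals then
    pvGo ((vals.erase 1).erase 0) (pares + 2)
  else
    pares + PySem.Int.floordiv vals.length 2
termination_by vals.length
decreasing_by
  have h1 : (vals.erase 1).length = vals.length - 1 := List.length_erase_of_mem ‹1 ∈ vals ∧ 0 ∈ vals›.1
  have h0 : (0:Int) ∈ vals.erase 1 := List.mem_erase_of_ne (by decide) |>.mpr ‹1 ∈ vals ∧ 0 ∈ vals›.2
  have h2 : ((vals.erase 1).erase 0).length = (vals.erase 1).length - 1 := List.length_erase_of_mem h0
  have h3 : 0 < vals.length := List.length_pos_of_mem ‹1 ∈ vals ∧ 0 ∈ vals›.1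
  omega

def contador_posibles_correctas_alt (lista : List Bool) : Int :=
  pvGo (lista.map (fun x => if x then (1:Int) else 0)) 0

-- ===== PRECONDITION & SPEC =====
def Spec_contador_posibles_correctas (lista : List Bool) (out : Int) : Prop := out = contador_posibles_correctas_alt lista
instance (lista : List Bool) (out : Int) : Decidable (Spec_contador_posibles_correctas lista out) := by unfold Spec_contador_posibles_correctas; infer_instance

-- ===== CLAIM (what is proved, stated in full; the proofs are below) =====
def Claim_equal_contador_posibles_correctas : Prop := ∀ (lista : List Bool), Dom_contador_posibles_correctas lista → Spec_contador_posibles_correctas lista (contador_posibles_correctas lista)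

-- ===== LEMMAS AND PROOFS =====

theorem pv_count_sum (vals : List Int) (hall : ∀ x ∈ vals, x = 0 ∨ x = 1) :
    vals.count 1 + vals.count 0 = vals.length := by
  induction vals with
  | nil => simp
  | cons h t ih =>
    have hh := hall h (by simp)
    have ih' := ih (fun x hx => hall x (by simp [hx]))
    rcases hh with h0 | h1 <;> subst_vars <;>
      simp [List.count_cons] <;> omega

theorem pvGo_closed (vals : List Int) (pares : Int) (hall : ∀ x ∈ vals, x = 0 ∨ x = 1) :
    pvGo vals pares = pares + PySem.Int.floordiv vals.length 2 +
      min (vals.count 1 : Int) (vals.count 0 : Int) := by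
  induction vals, pares using pvGo.induct with
  | case1 vals pares h ih =>
    rw [pvGo, if_pos h]
    obtain ⟨h1, h0⟩ := h
    have hall' : ∀ x ∈ (vals.erase 1).erase 0, x = 0 ∨ x = 1 := by
      intro x hx
      exact hall x (List.mem_of_mem_erase (List.mem_of_mem_erase hx))
    rw [ih hall']
    have h0' : (0:Int) ∈ vals.erase 1 := (List.mem_erase_of_ne (by decide)).mpr h0
    have hl1 : (vals.erase 1).length = vals.length - 1 := List.length_erase_of_mem h1
    have hl0 : ((vals.erase 1).erase 0).length = (vals.erase 1).length - 1 :=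
      List.length_erase_of_mem h0'
    have hc1 : ((vals.erase 1).erase 0).count 1 = vals.count 1 - 1 := by
      rw [List.count_erase_of_ne (by decide), List.count_erase_self]
    have hc0 : ((vals.erase 1).erase 0).count 0 = (vals.erase 1).count 0 - 1 := by
      rw [List.count_erase_self]
    have hc0' : (vals.erase 1).count 0 = vals.count 0 := by
      rw [List.count_erase_of_ne (by decide)]
    have ht : 1 ≤ vals.count 1 := List.one_le_count_iff.mpr h1
    have hf : 1 ≤ vals.count 0 := List.one_le_count_iff.mpr h0
    have hlen : vals.count 1 + vals.count 0 = vals.length := pv_count_sum vals hall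
    have hd : PySem.Int.floordiv (vals.length : Int) 2 = (vals.length : Int) / 2 :=
      PySem.Int.floordiv_eq_ediv_of_pos (by omega)
    have hd2 : PySem.Int.floordiv (((vals.erase 1).erase 0).length : Int) 2
        = (((vals.erase 1).erase 0).length : Int) / 2 :=
      PySem.Int.floordiv_eq_ediv_of_pos (by omega)
    rw [hd, hd2, hc1, hc0, hc0', hl0, hl1]
    push_cast [ht, hf, Nat.one_le_iff_ne_zero.mp]
    omega
  | case2 vals pares h =>
    rw [pvGo, if_neg h]
    have : vals.count 1 = 0 ∨ vals.count 0 = 0 := by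
      by_contra hc
      push_neg at hc
      exact h ⟨List.one_le_count_iff.mp (by omega), List.one_le_count_iff.mp (by omega)⟩
    rcases this with h' | h' <;> rw [h'] <;> push_cast <;>
      [skip; skip] <;> omega

theorem pv_foldl_eq_count (lista : List Bool) (a : Int) :
    lista.foldl (fun acc x => acc + (if x then (1:Int) else 0)) a
      = a + lista.count true := by
  induction lista generalizing a with
  | nil => simp
  | cons h t ih =>
    cases h <;> simp [List.foldl, ih, List.count_cons] <;> push_cast <;> ring

theorem pv_map_count_one (lista : List Bool) :
    (lista.map (fun x => if x then (1:Int) else 0)).count 1 = lista.count true := by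
  induction lista with
  | nil => simp
  | cons h t ih => cases h <;> simp [List.count_cons, ih]

theorem pv_map_count_zero (lista : List Bool) :
    (lista.map (fun x => if x then (1:Int) else 0)).count 0 = lista.count false := by
  induction lista with
  | nil => simp
  | cons h t ih => cases h <;> simp [List.count_cons, ih]

-- ===== VERDICT (by name: the statement is the Claim_ definition above) =====
theorem contador_posibles_correctas_spec : Claim_equal_contador_posibles_correctas := by
  intro lista _
  unfold Spec_contador_posibles_correctas contador_posibles_correctas contador_posibles_correctas_alt
  have hall : ∀ x ∈ lista.map (fun x => if x then (1:Int) else 0), x = 0 ∨ x = 1 := by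
    intro x hx
    simp only [List.mem_map] at hx
    obtain ⟨b, _, hb⟩ := hx
    cases b <;> simp_all
  rw [pvGo_closed _ _ hall, pv_map_count_one, pv_map_count_zero]
  simp only [pv_foldl_eq_count, zero_add, List.length_map]
  have hct : lista.count true + lista.count false = lista.length := by
    have := lista.count_true_add_count_false  -- may not exist; fallback below
    exact this
  have hd : PySem.Int.floordiv (lista.length : Int) 2 = (lista.length : Int) / 2 :=
    PySem.Int.floordiv_eq_ediv_of_pos (by omega)
  rw [hd]
  split_ifs <;> push_cast <;> omega
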